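-- pv_equiv track=rewrite | github.com/mouhebmhd/Designing_meCare-Guider_Personas_Understanding_Users | health_literacy_evaluation_and_persona_creation/legacy/hl_dashboard.py | _merge_consecutive_spans
-- ===== SOURCE A (Python) =====
-- def _merge_consecutive_spans(
--     spans: dict[tuple[int, int], str],
--     text: str,
-- ) -> dict[tuple[int, int], str]:
--     if not spans:
--         return spans
--     sorted_spans = sorted(spans.items(), key=lambda kv: kv[0][0])
--     merged: list[tuple[tuple[int, int], str]] = []
--     cur_start, cur_end = sorted_spans[0][0]
--     cur_layer = sorted_spans[0][1]
--     for (start, end), layer in sorted_spans[1:]: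
--         gap = text[cur_end:start]
--         if layer == cur_layer and gap.strip() == "":
--             cur_end = end
--         else:
--             merged.append(((cur_start, cur_end), cur_layer))
--             cur_start, cur_end, cur_layer = start, end, layer
--     merged.append(((cur_start, cur_end), cur_layer))
--     return dict(merged)
-- ===== SOURCE B (Python) =====
-- def _merge_consecutive_spans(
--     spans: dict[tuple[int, int], str],
--     text: str,
-- ) -> dict[tuple[int, int], str]:
--     if not spans:
--         return spans
--
--     def runs(items):
--         # peel one maximal run of same-layer, whitespace-joined spans, then recurse
--         if not items:
--             return []
--         (start, end), layer = items[0]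
--         i = 1
--         while (i < len(items)
--                and items[i][1] == layer
--                and text[end:items[i][0][0]].strip() == ""):
--             end = items[i][0][1]
--             i += 1
--         return [((start, end), layer)] + runs(items[i:])
--
--     return dict(runs(sorted(spans.items(), key=lambda kv: kv[0][0])))
-- ===== Notes on version B (the rewrite author's own statement) =====
-- stated objective: alternative
-- what changed: Replaces A's streaming accumulator merge (cur_* state updated per span plus a final flush) with a recursive run-extraction: peel one maximal whitespace-joined same-layer run at a time, emit its single merged span, and recurse on the remainder.
import Mathlib
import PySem

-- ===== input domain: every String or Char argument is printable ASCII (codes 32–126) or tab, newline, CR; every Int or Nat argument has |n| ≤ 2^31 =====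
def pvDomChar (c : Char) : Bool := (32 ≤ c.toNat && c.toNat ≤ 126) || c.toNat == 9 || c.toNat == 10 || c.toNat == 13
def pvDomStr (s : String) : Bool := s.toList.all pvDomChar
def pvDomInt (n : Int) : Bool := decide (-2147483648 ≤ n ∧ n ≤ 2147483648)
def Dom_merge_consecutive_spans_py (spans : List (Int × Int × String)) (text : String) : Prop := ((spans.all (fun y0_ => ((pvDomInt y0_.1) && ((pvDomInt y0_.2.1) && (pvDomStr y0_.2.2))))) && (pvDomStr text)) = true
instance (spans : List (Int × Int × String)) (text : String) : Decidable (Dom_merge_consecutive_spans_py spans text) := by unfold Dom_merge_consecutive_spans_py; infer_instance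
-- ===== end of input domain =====

-- B replaces A's streaming accumulator merge with a recursive maximal-run extraction (alternative decomposition, same cost).

-- shared port of the builtin `dict(...)` (insertion-order dict with key overwrite), flattened to triples
def pvDictOf (l : List (Int × Int × String)) : List (Int × Int × String) :=
  ((l.foldl (fun d t => d.insert (t.1, t.2.1) t.2.2) (PySem.Dict.empty : PySem.Dict (Int × Int) String)).items).map
    (fun p => (p.1.1, p.1.2, p.2))

-- ===== PORT A =====
-- the `for (start, end), layer in sorted_spans[1:]` loop with state (merged, cur_start, cur_end, cur_layer)
def mergeLoopA (text : String) : List (Int × Int × String) → List (Int × Int × String) → Int → Int → String → List (Int × Int × String)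
  | [], merged, cs, ce, cl => merged ++ [(cs, ce, cl)]
  | (s, e, l) :: rest, merged, cs, ce, cl =>
    if l == cl && PySem.Str.strip (PySem.Str.slice text (some ce) (some s)) == "" then
      mergeLoopA text rest merged cs e cl
    else
      mergeLoopA text rest (merged ++ [(cs, ce, cl)]) s e l

def merge_consecutive_spans_py (spans : List (Int × Int × String)) (text : String) : List (Int × Int × String) :=
  if spans = [] then spans
  else
    match PySem.List.sorted spans (fun kv => kv.1) false with
    | [] => []  -- unreachable: sorted of a nonempty list is nonempty
    | (cs, ce, cl) :: rest => pvDictOf (mergeLoopA text rest [] cs ce cl)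

-- ===== PORT B =====
-- the inner `while` of Source B's runs(): extend the current run while the next span has the
-- same layer and only whitespace in the gap; returns the merged span and the remaining items
def extendRun (text : String) (start fin : Int) (layer : String) :
    List (Int × Int × String) → (Int × Int × String) × List (Int × Int × String)
  | [] => ((start, fin, layer), [])
  | (s, e, l) :: rest =>
    if l == layer && PySem.Str.strip (PySem.Str.slice text (some fin) (some s)) == "" then
      extendRun text start e layer rest
    else ((start, fin, layer), (s, e, l) :: rest)

theorem extendRun_snd_length (text : String) :
    ∀ (xs : List (Int × Int × String)) (start fin : Int) (layer : String),
      (extendRun text start fin layer xs).2.length ≤ xs.length := by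
  intro xs
  induction xs with
  | nil => intro _ _ _; simp [extendRun]
  | cons hd tl ih =>
    intro start fin layer
    obtain ⟨s, e, l⟩ := hd
    simp only [extendRun]
    split
    · exact le_trans (ih start e layer) (Nat.le_succ _)
    · simp

-- Source B's recursive runs(): peel one maximal run, recurse on the remainder
def runsB (text : String) : List (Int × Int × String) → List (Int × Int × String)
  | [] => []
  | (s, e, l) :: rest =>
    let p := extendRun text s e l rest
    p.1 :: runsB text p.2
termination_by xs => xs.length
decreasing_by
  simpa using Nat.lt_succ_of_le (extendRun_snd_length text rest s e l)

def merge_consecutive_spans_py_alt (spans : List (Int × Int × String)) (text : String) : List (Int × Int × String) :=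
  if spans = [] then spans
  else pvDictOf (runsB text (PySem.List.sorted spans (fun kv => kv.1) false))

-- ===== PRECONDITION & SPEC =====
def Spec_merge_consecutive_spans_py (spans : List (Int × Int × String)) (text : String) (out : List (Int × Int × String)) : Prop := out = merge_consecutive_spans_py_alt spans text
instance (spans : List (Int × Int × String)) (text : String) (out : List (Int × Int × String)) : Decidable (Spec_merge_consecutive_spans_py spans text out) := by unfold Spec_merge_consecutive_spans_py; infer_instance

-- ===== CLAIM (what is proved, stated in full; the proofs are below) =====
def Claim_equal_merge_consecutive_spans_py : Prop := ∀ (spans : List (Int × Int × String)) (text : String), Dom_merge_consecutive_spans_py spans text → Spec_merge_consecutive_spans_py spans text (merge_consecutive_spans_py spans text)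

-- ===== LEMMAS AND PROOFS =====
-- A's loop, started with current span (cs,ce,cl) and already-emitted `merged`, produces
-- exactly `merged` followed by the maximal run extending (cs,ce,cl) and then B's runs of the rest.
theorem loop_eq_runs (text : String) :
    ∀ (rest : List (Int × Int × String)) (merged : List (Int × Int × String)) (cs ce : Int) (cl : String),
      mergeLoopA text rest merged cs ce cl
        = merged ++ ((extendRun text cs ce cl rest).1 :: runsB text (extendRun text cs ce cl rest).2) := by
  intro rest
  induction rest with
  | nil => intro merged cs ce cl; simp [mergeLoopA, extendRun, runsB]
  | cons hd tl ih =>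
    intro merged cs ce cl
    obtain ⟨s, e, l⟩ := hd
    simp only [mergeLoopA, extendRun]
    by_cases h : (l == cl && PySem.Str.strip (PySem.Str.slice text (some ce) (some s)) == "") = true
    · simp only [h, if_true]
      exact ih merged cs e cl
    · simp only [h, if_false, Bool.false_eq_true]
      rw [ih (merged ++ [(cs, ce, cl)]) s e l]
      simp [runsB]

theorem merge_consecutive_spans_py_eq_alt (spans : List (Int × Int × String)) (text : String) :
    merge_consecutive_spans_py spans text = merge_consecutive_spans_py_alt spans text := by
  unfold merge_consecutive_spans_py merge_consecutive_spans_py_alt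
  by_cases hs : spans = []
  · simp [hs]
  · simp only [hs, if_false]
    rcases hsort : PySem.List.sorted spans (fun kv => kv.1) false with _ | ⟨⟨cs, ce, cl⟩, rest⟩
    · exact absurd ((PySem.List.sorted_eq_nil_iff _ _ _).mp hsort) hs
    · simp only []
      rw [loop_eq_runs, runsB]
      simp

-- ===== VERDICT (by name: the statement is the Claim_ definition above) =====
theorem merge_consecutive_spans_py_spec : Claim_equal_merge_consecutive_spans_py := by
  intro spans text _
  exact merge_consecutive_spans_py_eq_alt spans text
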